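-- pv_equiv track=rewrite | github.com/DiamondDolby/Python-Programs | encrypt_sentence.py | encrypt_sentence
-- ===== SOURCE A (Python) =====
-- def encrypt_sentence(sentence):
--     words = sentence.split()
--     encrypted_words = []
--
--     vowels = 'aeiouAEIOU'
--
--     for i in range(len(words)):
--         word = words[i]
--         if (i + 1) % 2 != 0:  # Odd position (1-based index)
--             encrypted_words.append(word[::-1])
--         else:  # Even position
--             consonants = ''.join([ch for ch in word if ch not in vowels])
--             vowels_part = ''.join([ch for ch in word if ch in vowels])
--             encrypted_words.append(consonants + vowels_part)
--
--     return ' '.join(encrypted_words)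
-- ===== SOURCE B (Python) =====
-- VOWELS = 'aeiouAEIOU'
--
--
-- def encrypt_sentence(sentence):
--     out = []
--     odd = True
--     for word in sentence.split():
--         if odd:
--             out.append(word[::-1])
--         else:
--             # stable sort: consonants (key False) before vowels (key True),
--             # each group keeping its original relative order
--             out.append(''.join(sorted(word, key=lambda ch: ch in VOWELS)))
--         odd = not odd
--     return ' '.join(out)
-- ===== Notes on version B (the rewrite author's own statement) =====
-- stated objective: idiomatic
-- what changed: B drops A's index/range loop and (i+1)%2 test for a direct iteration with a toggled parity flag, and produces each even-positioned word by one stable sort keyed on the vowel predicate instead of A's two filtering comprehensions.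
import Mathlib
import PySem

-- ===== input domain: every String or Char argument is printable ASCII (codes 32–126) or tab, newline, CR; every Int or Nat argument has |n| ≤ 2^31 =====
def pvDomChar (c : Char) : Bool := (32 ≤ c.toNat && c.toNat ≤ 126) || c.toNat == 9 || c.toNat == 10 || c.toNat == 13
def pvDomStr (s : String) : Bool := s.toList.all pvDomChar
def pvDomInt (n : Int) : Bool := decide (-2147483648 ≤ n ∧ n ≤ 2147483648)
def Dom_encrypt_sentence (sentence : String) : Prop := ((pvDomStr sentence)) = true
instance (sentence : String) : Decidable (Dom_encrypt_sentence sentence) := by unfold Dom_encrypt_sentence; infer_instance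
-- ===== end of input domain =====

-- B replaces A's index/range loop and (i+1)%2 test by a direct iteration with a toggled parity
-- flag, and builds each even-positioned word by ONE stable sort on the vowel predicate instead of
-- A's two filtering comprehensions (idiomatic alternative, same observable result).

-- ===== PORT A =====
def encrypt_sentence (sentence : String) : String :=
  let words := PySem.Chars.split₀ sentence.toList
  let vowels := "aeiouAEIOU".toList
  let encrypted_words := (PySem.List.pyRange 0 (words.length : Int) 1).foldl
    (fun acc i =>
      let word := PySem.List.pyGetD words i []
      if PySem.Int.mod (i + 1) 2 ≠ 0 then
        -- word[::-1]: a full step -1 slice is reverse (PySem.List.slice?_none_none_neg_one)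
        acc ++ [word.reverse]
      else
        -- ''.join([ch for ch in word if ch not in vowels]): on a list of code points,
        -- 'ch in vowels' for a single character is exactly character membership
        let consonants := word.filter (fun ch => !(vowels.contains ch))
        let vowels_part := word.filter (fun ch => vowels.contains ch)
        acc ++ [consonants ++ vowels_part])
    []
  String.ofList (PySem.Chars.join [' '] encrypted_words)

-- ===== PORT B =====
def encrypt_sentence_alt (sentence : String) : String :=
  let res := (PySem.Chars.split₀ sentence.toList).foldl
    (fun (st : List (List Char) × Bool) word =>
      if st.2 then
        (st.1 ++ [word.reverse], !st.2)
      else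
        -- sorted(word, key=lambda ch: ch in VOWELS): 'ch in VOWELS' for a single
        -- character is character membership; False < True orders consonants first
        (st.1 ++ [PySem.List.sorted word (fun ch => "aeiouAEIOU".toList.contains ch) false], !st.2))
    ([], true)
  String.ofList (PySem.Chars.join [' '] res.1)

-- ===== PRECONDITION & SPEC =====
def Spec_encrypt_sentence (sentence : String) (out : String) : Prop := out = encrypt_sentence_alt sentence
instance (sentence : String) (out : String) : Decidable (Spec_encrypt_sentence sentence out) := by unfold Spec_encrypt_sentence; infer_instance

-- ===== CLAIM (what is proved, stated in full; the proofs are below) =====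
def Claim_equal_encrypt_sentence : Prop := ∀ (sentence : String), Dom_encrypt_sentence sentence → Spec_encrypt_sentence sentence (encrypt_sentence sentence)

-- ===== LEMMAS AND PROOFS =====

-- inserting x into a block of false-keys followed by a block of true-keys
theorem pvInsert (p : Char → Bool) (x : Char) : ∀ (C V : List Char),
    (∀ c ∈ C, p c = false) → (∀ v ∈ V, p v = true) →
    PySem.List.insertBy (fun a b => decide (p a < p b)) x (C ++ V)
      = if p x then C ++ V ++ [x] else C ++ x :: V
  | [], [], _, _ => by by_cases h : p x <;> simp [h, PySem.List.insertBy]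
  | [], v :: V, _, hV => by
    have hv : p v = true := hV v (by simp)
    by_cases h : p x
    · have := pvInsert p x [] V (by simp) (fun a ha => hV a (by simp [ha]))
      simp [h] at this
      simp [PySem.List.insertBy, h, hv, this]
    · simp [PySem.List.insertBy, h, hv]
  | c :: C, V, hC, hV => by
    have hc : p c = false := hC c (by simp)
    have := pvInsert p x C V (fun a ha => hC a (by simp [ha])) hV
    by_cases h : p x <;>
      simp_all [PySem.List.insertBy]

-- the insertion-sort fold keeps consonants-then-vowels, each block in input order
theorem pvFoldInsert (p : Char → Bool) : ∀ (w C V : List Char),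
    (∀ c ∈ C, p c = false) → (∀ v ∈ V, p v = true) →
    w.foldl (fun acc x => PySem.List.insertBy (fun a b => decide (p a < p b)) x acc) (C ++ V)
      = (C ++ w.filter (fun c => !p c)) ++ (V ++ w.filter p)
  | [], C, V, _, _ => by simp
  | x :: w, C, V, hC, hV => by
    rw [List.foldl_cons, pvInsert p x C V hC hV]
    by_cases h : p x
    · have hV' : ∀ v ∈ V ++ [x], p v = true := by
        intro v hv
        rcases List.mem_append.1 hv with h' | h'
        · exact hV v h'
        · simp at h'; simpa [h']
      have := pvFoldInsert p w C (V ++ [x]) hC hV'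
      rw [if_pos h, show C ++ V ++ [x] = C ++ (V ++ [x]) by simp, this]
      simp [h, List.append_assoc]
    · have hC' : ∀ c ∈ C ++ [x], p c = false := by
        intro c hc
        rcases List.mem_append.1 hc with h' | h'
        · exact hC c h'
        · simp at h'; simp [h']; simpa using h
      have := pvFoldInsert p w (C ++ [x]) V hC' hV
      rw [if_neg h, show C ++ x :: V = (C ++ [x]) ++ V by simp, this]
      simp [h, List.append_assoc]

-- A's consonants-then-vowels pair of filters IS B's stable sort by the vowel key
theorem pvMix_eq (p : Char → Bool) (w : List Char) :
    PySem.List.sorted w p false = w.filter (fun c => !p c) ++ w.filter p := by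
  rw [PySem.List.sorted_eq_foldl_insertBy]
  have := pvFoldInsert p w [] [] (by simp) (by simp)
  simpa using this

-- the common shape both loops produce, with the running parity flag
def pvTr : List (List Char) → Bool → List (List Char)
  | [], _ => []
  | w :: ws, odd =>
    (if odd then w.reverse
     else w.filter (fun c => !("aeiouAEIOU".toList.contains c)) ++
          w.filter (fun c => "aeiouAEIOU".toList.contains c)) :: pvTr ws (!odd)

-- A's per-index body, with the index a Nat and an explicit parity flag
def pvF (ws : List (List Char)) (odd : Bool) (k : Nat) : List Char :=
  if ((k % 2 == 0) == odd) then (ws.getD k []).reverse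
  else (ws.getD k []).filter (fun c => !("aeiouAEIOU".toList.contains c)) ++
       (ws.getD k []).filter (fun c => "aeiouAEIOU".toList.contains c)

theorem pvA_eq_tr : ∀ (ws : List (List Char)) (odd : Bool),
    (List.range ws.length).map (pvF ws odd) = pvTr ws odd
  | [], _ => rfl
  | w :: ws, odd => by
    rw [List.length_cons, List.range_succ_eq_map, List.map_cons, List.map_map]
    have h0 : pvF (w :: ws) odd 0 = (if odd then w.reverse
        else w.filter (fun c => !("aeiouAEIOU".toList.contains c)) ++
             w.filter (fun c => "aeiouAEIOU".toList.contains c)) := by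
      cases odd <;> simp [pvF]
    have hs : ∀ k, (pvF (w :: ws) odd ∘ Nat.succ) k = pvF ws (!odd) k := by
      intro k
      have hm : ((k + 1) % 2 == 0) = !(k % 2 == 0) := by
        rcases Nat.mod_two_eq_zero_or_one k with h | h <;> simp [Nat.add_mod, h]
      have hb : ((!(k % 2 == 0)) == odd) = ((k % 2 == 0) == !odd) := by
        cases odd <;> cases (k % 2 == 0) <;> rfl
      simp only [Function.comp, pvF, Nat.succ_eq_add_one, List.getD_cons_succ, hm, hb]
    rw [h0, List.map_congr_left (fun k _ => hs k), pvA_eq_tr ws (!odd)]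
    rfl

-- A's indexed fold over the word list produces the parity-flagged shape
theorem pv_key (ws : List (List Char)) :
    (PySem.List.pyRange 0 (ws.length : Int) 1).foldl
      (fun acc i =>
        let word := PySem.List.pyGetD ws i []
        if PySem.Int.mod (i + 1) 2 ≠ 0 then
          acc ++ [word.reverse]
        else
          let consonants := word.filter (fun ch => !("aeiouAEIOU".toList.contains ch))
          let vowels_part := word.filter (fun ch => "aeiouAEIOU".toList.contains ch)
          acc ++ [consonants ++ vowels_part])
      [] = pvTr ws true := by
  have hbody : (fun (acc : List (List Char)) (i : Int) =>
      let word := PySem.List.pyGetD ws i []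
      if PySem.Int.mod (i + 1) 2 ≠ 0 then
        acc ++ [word.reverse]
      else
        let consonants := word.filter (fun ch => !("aeiouAEIOU".toList.contains ch))
        let vowels_part := word.filter (fun ch => "aeiouAEIOU".toList.contains ch)
        acc ++ [consonants ++ vowels_part])
      = (fun acc i => acc ++ [if PySem.Int.mod (i + 1) 2 ≠ 0 then (PySem.List.pyGetD ws i []).reverse
          else (PySem.List.pyGetD ws i []).filter (fun ch => !("aeiouAEIOU".toList.contains ch)) ++
               (PySem.List.pyGetD ws i []).filter (fun ch => "aeiouAEIOU".toList.contains ch)]) := by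
    funext acc i
    exact (apply_ite (fun z => acc ++ [z]) _ _ _).symm
  rw [hbody, PySem.List.foldl_append_singleton_eq_map, PySem.List.pyRange_zero_natCast, List.map_map]
  rw [List.nil_append, ← pvA_eq_tr ws true]
  apply List.map_congr_left
  intro k _
  simp only [Function.comp, pvF, PySem.List.pyGetD_natCast]
  have hm : PySem.Int.mod ((k : Int) + 1) 2 = ((k + 1) % 2 : Nat) := by
    have h := PySem.Int.mod_natCast (k + 1) 2
    push_cast at h ⊢
    exact h
  rw [hm]
  by_cases h : (k + 1) % 2 = 0
  · have hb : ((k % 2 == 0) == true) = false := by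
      rcases Nat.mod_two_eq_zero_or_one k with h' | h'
      · simp [h']; omega
      · simp [h']
    simp [h, hb]
  · have hk : k % 2 = 0 := by omega
    have hn : ((k + 1) % 2 : Nat) ≠ (0 : Nat) := h
    rw [if_pos (by exact_mod_cast hn), if_pos (by simp [hk])]

-- B's parity-flagged fold produces the same shape
theorem pvB_eq : ∀ (ws : List (List Char)) (out : List (List Char)) (odd : Bool),
    (ws.foldl (fun (st : List (List Char) × Bool) word =>
        if st.2 then
          (st.1 ++ [word.reverse], !st.2)
        else
          (st.1 ++ [PySem.List.sorted word (fun ch => "aeiouAEIOU".toList.contains ch) false], !st.2))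
      (out, odd)).1 = out ++ pvTr ws odd
  | [], out, odd => by simp [pvTr]
  | w :: ws, out, odd => by
    rw [List.foldl_cons]
    by_cases h : odd
    · rw [h]
      simpa [pvTr] using pvB_eq ws (out ++ [w.reverse]) false
    · have hodd : odd = false := by simpa using h
      rw [hodd]
      have := pvB_eq ws (out ++ [PySem.List.sorted w (fun ch => "aeiouAEIOU".toList.contains ch) false]) true
      simpa [pvTr, pvMix_eq] using this

theorem pv_top (s : String) : encrypt_sentence s = encrypt_sentence_alt s := by
  unfold encrypt_sentence encrypt_sentence_alt
  dsimp only
  rw [pv_key, pvB_eq]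
  rfl

-- ===== VERDICT (by name: the statement is the Claim_ definition above) =====
theorem encrypt_sentence_spec : Claim_equal_encrypt_sentence := by
  intro s _
  unfold Spec_encrypt_sentence
  exact pv_top s
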